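-- pv_equiv track=rewrite | github.com/ckadelka/COVID19-CDC-allocation-evaluation | fitfunc_v39.py | get_i1_to_i4
-- ===== SOURCE A (Python) =====
-- def get_i1_to_i4(ID):
--     def get_two_indices(dummy):
--         counter = -1
--         for index_smaller in range(4):
--             for index_larger in range(index_smaller,4):
--                 counter+=1
--                 if counter==dummy:
--                     break
--             if counter==dummy:
--                 break
--         return (index_larger,index_smaller)
--
--     indices = [0]*4
--     for i in range(2):
--         ID = ID % (10**(2-i))
--         dummy = int(ID / 10**(1-i))
--         (indices[2*i],indices[2*i+1]) = get_two_indices(dummy)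
--     return indices
-- ===== SOURCE B (Python) =====
-- def get_i1_to_i4(ID):
--     # Closed-form decode of the triangular pair enumeration:
--     # rows start at offsets off(s) = s*(9-s)//2 = [0,4,7,9]; pick the row, then
--     # index_larger = s + (d - off(s)).  No inner counter scan.
--     out = []
--     for d in (ID % 100 // 10, ID % 10):
--         s = 3 if d >= 9 else 2 if d >= 7 else 1 if d >= 4 else 0
--         off = s * (9 - s) // 2
--         out.append(s + d - off)
--         out.append(s)
--     return out
-- ===== Notes on version B (the rewrite author's own statement) =====
-- stated objective: simpler
-- what changed: Replaces the nested counter-scan over all triangular pairs with a closed-form decode: cumulative row offsets select the row by threshold comparisons and arithmetic gives index_larger directly.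
import Mathlib
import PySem

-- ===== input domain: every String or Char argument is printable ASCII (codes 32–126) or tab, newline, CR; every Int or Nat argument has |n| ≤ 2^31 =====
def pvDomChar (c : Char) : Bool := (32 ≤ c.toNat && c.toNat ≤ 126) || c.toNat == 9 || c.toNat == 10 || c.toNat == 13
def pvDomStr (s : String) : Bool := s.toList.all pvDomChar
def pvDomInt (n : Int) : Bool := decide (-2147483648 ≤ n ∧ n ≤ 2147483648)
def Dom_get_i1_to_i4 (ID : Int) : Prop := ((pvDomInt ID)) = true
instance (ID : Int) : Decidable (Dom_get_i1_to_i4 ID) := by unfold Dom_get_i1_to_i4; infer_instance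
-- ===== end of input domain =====

-- B replaces A's nested counter scan over triangular pairs with a closed-form
-- arithmetic decode (row offsets s*(9-s)//2); objective: simpler.


-- ===== PORT A =====
-- inner helper get_two_indices: nested for-loops with break, carried state
-- (counter, index_larger, index_smaller, broke); loop variables keep their
-- last value on break, exactly as in Python.
def get_two_indices (dummy : Int) : Int × Int :=
  let st :=
    (PySem.List.pyRange 0 4 1).foldl
      (fun (st : Int × Int × Int × Bool) index_smaller =>
        let (counter, index_larger, _, broke) := st
        if broke then st
        else
          -- inner: for index_larger in range(index_smaller,4): counter+=1; if counter==dummy: break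
          let st2 :=
            (PySem.List.pyRange index_smaller 4 1).foldl
              (fun (p : Int × Int × Bool) l =>
                let (c, il, b) := p
                if b then (c, il, b)
                else
                  let c' := c + 1
                  (c', l, c' == dummy))
              (counter, index_larger, false)
          let (c', il', _) := st2
          -- outer: if counter==dummy: break
          (c', il', index_smaller, c' == dummy))
      (-1, 0, 0, false)
  (st.2.1, st.2.2.1)

-- int(ID / 10**(1-i)) : ID here is in [0,100) so the float division is exact and
-- truncation toward zero equals floor division; ported as PySem.Int.floordiv.
def get_i1_to_i4 (ID : Int) : List Int :=
  let st :=
    (PySem.List.pyRange 0 2 1).foldl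
      (fun (st : Int × List Int) i =>
        let (id, indices) := st
        let id' := PySem.Int.mod id ((10 : Int) ^ (2 - i).toNat)
        let dummy := PySem.Int.floordiv id' ((10 : Int) ^ (1 - i).toNat)
        let (il, ismall) := get_two_indices dummy
        (id', (indices.set (2 * i).toNat il).set (2 * i + 1).toNat ismall))
      (ID, [0, 0, 0, 0])
  st.2

-- ===== PORT B =====
def get_i1_to_i4_alt (ID : Int) : List Int :=
  [PySem.Int.floordiv (PySem.Int.mod ID 100) 10, PySem.Int.mod ID 10].foldl
    (fun (out : List Int) d =>
      let s : Int := if d ≥ 9 then 3 else if d ≥ 7 then 2 else if d ≥ 4 then 1 else 0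
      let off := PySem.Int.floordiv (s * (9 - s)) 2
      (out ++ [s + d - off]) ++ [s])
    []

-- ===== PRECONDITION & SPEC =====
def Spec_get_i1_to_i4 (ID : Int) (out : List Int) : Prop := out = get_i1_to_i4_alt ID
instance (ID : Int) (out : List Int) : Decidable (Spec_get_i1_to_i4 ID out) := by unfold Spec_get_i1_to_i4; infer_instance

-- ===== CLAIM (what is proved, stated in full; the proofs are below) =====
def Claim_equal_get_i1_to_i4 : Prop := ∀ (ID : Int), Dom_get_i1_to_i4 ID → Spec_get_i1_to_i4 ID (get_i1_to_i4 ID)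


-- ===== LEMMAS AND PROOFS =====

-- PySem.Int.mod nests like Python %: (a % 100) % 100 = a % 100, (a % 100) % 10 = a % 10
theorem pv_mod_mod_100 (a : Int) :
    PySem.Int.mod (PySem.Int.mod a 100) 100 = PySem.Int.mod a 100 := by
  rw [PySem.Int.mod_eq_emod_of_pos (by norm_num : (0:Int) < 100),
      PySem.Int.mod_eq_emod_of_pos (by norm_num : (0:Int) < 100)]
  simp [Int.emod_emod_of_dvd]

theorem pv_mod_mod_10 (a : Int) :
    PySem.Int.mod (PySem.Int.mod a 100) 10 = PySem.Int.mod a 10 := by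
  rw [PySem.Int.mod_eq_emod_of_pos (by norm_num : (0:Int) < 100),
      PySem.Int.mod_eq_emod_of_pos (by norm_num : (0:Int) < 10),
      PySem.Int.mod_eq_emod_of_pos (by norm_num : (0:Int) < 10)]
  exact Int.emod_emod_of_dvd a (by norm_num)

-- both programs depend only on ID % 100
theorem pvA_mod (ID : Int) :
    get_i1_to_i4 ID = get_i1_to_i4 (PySem.Int.mod ID 100) := by
  have hr : PySem.List.pyRange 0 2 1 = [0, 1] := by decide
  simp only [get_i1_to_i4, hr, List.foldl]
  norm_num [pv_mod_mod_100]
  norm_num [show ((10:Int) ^ Int.toNat 2) = 100 by decide, Int.emod_emod_of_dvd]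

theorem pvB_mod (ID : Int) :
    get_i1_to_i4_alt ID = get_i1_to_i4_alt (PySem.Int.mod ID 100) := by
  simp only [get_i1_to_i4_alt, List.foldl, pv_mod_mod_100, pv_mod_mod_10]

theorem pv_small (n : Int) (h : 0 ≤ n) (h' : n < 100) :
    get_i1_to_i4 n = get_i1_to_i4_alt n := by
  interval_cases n <;> decide

-- ===== VERDICT (by name: the statement is the Claim_ definition above) =====
theorem get_i1_to_i4_spec : Claim_equal_get_i1_to_i4 := by
  intro ID _
  unfold Spec_get_i1_to_i4
  rw [pvA_mod, pvB_mod]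
  exact pv_small _
    (by rw [PySem.Int.mod_eq_emod_of_pos (by norm_num : (0:Int) < 100)]
        exact Int.emod_nonneg ID (by norm_num))
    (by rw [PySem.Int.mod_eq_emod_of_pos (by norm_num : (0:Int) < 100)]
        exact Int.emod_lt_of_pos ID (by norm_num))
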